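-- pv_equiv track=rewrite | github.com/cedadev/gws-scanner | gws_volume_scanner/client/queries.py | _list_tree_above
-- ===== SOURCE A (Python) =====
-- def _list_tree_above(path: str) -> str:
--     """For a given path, let a list of all paths above it in the tree."""
--     subpaths: list[str] = []
--     for part in path.strip("/").split("/"):
--         if len(subpaths) == 0:
--             subpaths.append("/" + part)
--         else:
--             subpaths.append(subpaths[-1] + "/" + part)
--     return subpaths
-- ===== SOURCE B (Python) =====
-- def _list_tree_above(path: str) -> str:
--     """For a given path, let a list of all paths above it in the tree."""
--     parts = path.strip("/").split("/")
--     return ["/" + "/".join(parts[:i + 1]) for i in range(len(parts))]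
-- ===== Notes on version B (the rewrite author's own statement) =====
-- stated objective: simpler
-- what changed: Replaces the stateful loop that extends the previously appended string (with its empty/nonempty branch and last-element lookup) by a stateless comprehension that joins each slice parts[:i+1] of the split parts independently.
import Mathlib
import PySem

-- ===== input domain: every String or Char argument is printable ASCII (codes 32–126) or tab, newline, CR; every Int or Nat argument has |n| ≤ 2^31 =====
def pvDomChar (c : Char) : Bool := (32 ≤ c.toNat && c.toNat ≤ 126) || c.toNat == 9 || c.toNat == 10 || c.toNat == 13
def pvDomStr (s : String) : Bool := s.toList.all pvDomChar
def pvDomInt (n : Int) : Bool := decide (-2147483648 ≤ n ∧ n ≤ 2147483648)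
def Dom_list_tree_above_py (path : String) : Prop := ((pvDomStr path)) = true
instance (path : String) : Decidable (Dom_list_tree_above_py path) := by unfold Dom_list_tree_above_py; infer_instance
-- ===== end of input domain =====

-- ===== PORT A =====
-- B computes each ancestor prefix independently from a slice of the split parts,
-- removing A's running accumulator — objective: simpler.
-- shared helper: Python's s.split("/") (sep is the nonempty literal "/", so split? is always some)
def pySplitSlash (s : String) : List String := (PySem.Str.split? s "/").getD []

def list_tree_above_py (path : String) : List String :=
  (pySplitSlash (PySem.Str.stripChars path "/")).foldl
    (fun subpaths part =>
      if subpaths.length == 0 then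
        subpaths ++ ["/" ++ part]
      else
        subpaths ++ [PySem.List.pyGetD subpaths (-1) "" ++ "/" ++ part])
    []

-- ===== PORT B =====
def list_tree_above_py_alt (path : String) : List String :=
  let parts := pySplitSlash (PySem.Str.stripChars path "/")
  (PySem.List.pyRange 0 parts.length 1).map
    (fun i => "/" ++ PySem.Str.join "/" (PySem.List.slice parts none (some (i + 1))))

-- ===== PRECONDITION & SPEC =====
def Spec_list_tree_above_py (path : String) (out : List String) : Prop := out = list_tree_above_py_alt path
instance (path : String) (out : List String) : Decidable (Spec_list_tree_above_py path out) := by unfold Spec_list_tree_above_py; infer_instance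

-- ===== CLAIM (what is proved, stated in full; the proofs are below) =====
def Claim_equal_list_tree_above_py : Prop := ∀ (path : String), Dom_list_tree_above_py path → Spec_list_tree_above_py path (list_tree_above_py path)

-- ===== LEMMAS AND PROOFS =====

theorem chars_join_append_singleton (sep x : List Char) (l : List (List Char))
    (h : l ≠ []) :
    PySem.Chars.join sep (l ++ [x]) = PySem.Chars.join sep l ++ sep ++ x := by
  induction l with
  | nil => exact absurd rfl h
  | cons a rest ih =>
    cases rest with
    | nil =>
        simp [PySem.Chars.join_cons_cons, PySem.Chars.join_singleton]
    | cons b rs =>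
        have hih := ih (by simp)
        simp only [List.cons_append] at hih ⊢
        rw [PySem.Chars.join_cons_cons, PySem.Chars.join_cons_cons, hih]
        simp [List.append_assoc]

theorem join_append_singleton (sep x : String) (xs : List String)
    (h : xs ≠ []) :
    PySem.Str.join sep (xs ++ [x]) = PySem.Str.join sep xs ++ sep ++ x := by
  apply String.toList_inj.mp
  simp only [String.toList_append, PySem.Str.toList_join, List.map_append, List.map_cons,
    List.map_nil]
  exact chars_join_append_singleton sep.toList x.toList (xs.map String.toList)
    (by simpa using h)

theorem join_singleton' (sep x : String) : PySem.Str.join sep [x] = x := by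
  apply String.toList_inj.mp
  simp [PySem.Str.toList_join, PySem.Chars.join_singleton]

theorem main_lemma (parts : List String) :
    parts.foldl
      (fun subpaths part =>
        if subpaths.length == 0 then
          subpaths ++ ["/" ++ part]
        else
          subpaths ++ [PySem.List.pyGetD subpaths (-1) "" ++ "/" ++ part])
      []
    = (List.range parts.length).map
        (fun k => "/" ++ PySem.Str.join "/" (parts.take (k + 1))) := by
  induction parts using List.reverseRecOn with
  | nil => simp
  | append_singleton parts p ih =>
    rw [List.foldl_append, ih]
    cases parts with
    | nil =>
        simp [List.range_succ, join_singleton']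
    | cons q qs =>
        set n := (q :: qs).length with hn
        have hnpos : 0 < n := by simp [hn]
        have hmap : ∀ k ∈ List.range n,
            "/" ++ PySem.Str.join "/" (((q :: qs) ++ [p]).take (k + 1))
              = "/" ++ PySem.Str.join "/" ((q :: qs).take (k + 1)) := by
          intro k hk
          rw [List.mem_range] at hk
          rw [List.take_append_of_le_length (by omega)]
        simp only [List.foldl_cons, List.foldl_nil]
        rw [if_neg (by simp; omega)]
        -- rewrite the running list with its last element explicit
        obtain ⟨m, hm⟩ : ∃ m, n = m + 1 := ⟨n - 1, by omega⟩
        rw [hm, List.range_succ, List.map_append, List.map_cons, List.map_nil,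
          PySem.List.pyGetD_neg_one_append_singleton]
        have hlenR : (q :: qs ++ [p]).length = m + 1 + 1 := by
          have h2 := hm; rw [hn] at h2; simp [← h2]
        rw [hlenR, List.range_succ, List.map_append, List.map_cons, List.map_nil]
        rw [hm] at hmap
        rw [List.map_congr_left hmap, List.range_succ, List.map_append, List.map_cons,
          List.map_nil]
        have hkey : "/" ++ PySem.Str.join "/" (List.take (m + 1) (q :: qs)) ++ "/" ++ p
            = "/" ++ PySem.Str.join "/" (List.take (m + 1 + 1) (q :: qs ++ [p])) := by
          have htm : (q :: qs).take (m + 1) = q :: qs := by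
            apply List.take_of_length_le; rw [← hn, hm]
          have htall : ((q :: qs) ++ [p]).take (m + 1 + 1) = (q :: qs) ++ [p] := by
            apply List.take_of_length_le
            simp only [List.length_append, List.length_cons, List.length_nil] at hlenR ⊢
            omega
          rw [htm, htall, join_append_singleton _ _ _ (by simp)]
          simp [String.append_assoc]
        rw [hkey]

theorem alt_eq (path : String) :
    list_tree_above_py_alt path
      = (List.range (pySplitSlash (PySem.Str.stripChars path "/")).length).map
          (fun k => "/" ++ PySem.Str.join "/"
            ((pySplitSlash (PySem.Str.stripChars path "/")).take (k + 1))) := by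
  simp only [list_tree_above_py_alt]
  rw [PySem.List.pyRange_zero_natCast, List.map_map]
  apply List.map_congr_left
  intro k _
  simp only [Function.comp_apply]
  have h1 : ((k : Int) + 1) = ((k + 1 : Nat) : Int) := by push_cast; ring
  rw [h1, PySem.List.slice_to_natCast]

-- ===== VERDICT (by name: the statement is the Claim_ definition above) =====
theorem list_tree_above_py_spec : Claim_equal_list_tree_above_py := by
  intro path _
  unfold Spec_list_tree_above_py list_tree_above_py
  rw [alt_eq, main_lemma]
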